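-- pv_equiv track=rewrite | github.com/timetobye/BOJ_Solution | try_problem/7568.py | get_order_numbers
-- ===== SOURCE A (Python) =====
-- def get_order_numbers(num, pair_list):
--     pair_score_list = [0 for _ in range(len(pair_list))]
--
--     for idx_i, pair_i in enumerate(pair_list):
--         for idx_j, pair_j in enumerate(pair_list):
--             # 같은 것은 패스
--             if idx_i == idx_j:
--                 continue
--
--             if (pair_i[0] > pair_j[0]) and (pair_i[1] > pair_j[1]):
--                 pair_score_list[idx_i] += 2
--             elif (pair_i[0] > pair_j[0]) and (pair_i[1] < pair_j[1]):
--                 pair_score_list[idx_i] += 1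
--             elif (pair_i[0] < pair_j[0]) and (pair_i[1] > pair_j[1]):
--                 pair_score_list[idx_i] += 1
--
--     pair_score_dict = {}
--     rank = 1
--     ordered_pair_score_list = sorted(pair_score_list, reverse=True)
--
--     for pair_score in ordered_pair_score_list:
--         if pair_score not in pair_score_dict:
--             pair_score_dict[pair_score] = rank
--             rank += 1
--         else:
--             rank += 1
--
--     pair_score_result = []
--
--     for pair_score in pair_score_list:
--         result = pair_score_dict[pair_score]
--         pair_score_result.append(result)
--
--     return pair_score_result
-- ===== SOURCE B (Python) =====
-- def get_order_numbers(num, pair_list):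
--     # scores via a split dominance count (self contributes 0 automatically),
--     # ranks as 1 + number of strictly larger scores (no sort, no dict)
--     scores = [
--         sum((p[0] > q[0] and p[1] != q[1]) + (p[1] > q[1] and p[0] != q[0]) for q in pair_list)
--         for p in pair_list
--     ]
--     return [1 + sum(t > s for t in scores) for s in scores]
-- ===== Notes on version B (the rewrite author's own statement) =====
-- stated objective: simpler
-- what changed: B drops A's mutable score array, sort and rank-dict entirely: each score is one comprehension summing two boolean dominance indicators per opponent (the self-comparison needs no skip since it contributes 0), and each rank is computed directly as 1 + the number of strictly larger scores.
-- outside the precondition, e.g. on get_order_numbers(1, [(5,)]): A returns [1], B raises IndexError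
import Mathlib
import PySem

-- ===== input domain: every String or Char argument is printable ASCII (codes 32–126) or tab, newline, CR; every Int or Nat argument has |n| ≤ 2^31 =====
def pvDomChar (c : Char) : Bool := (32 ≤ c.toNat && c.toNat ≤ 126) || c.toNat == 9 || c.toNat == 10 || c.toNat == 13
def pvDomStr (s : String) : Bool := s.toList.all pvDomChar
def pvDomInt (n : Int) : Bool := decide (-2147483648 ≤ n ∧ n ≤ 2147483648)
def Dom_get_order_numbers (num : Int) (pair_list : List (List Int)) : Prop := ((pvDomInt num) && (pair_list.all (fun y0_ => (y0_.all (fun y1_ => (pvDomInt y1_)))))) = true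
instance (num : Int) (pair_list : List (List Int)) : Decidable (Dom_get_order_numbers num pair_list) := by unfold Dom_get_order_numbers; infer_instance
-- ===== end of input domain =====

-- B replaces A's quadratic dominance scoring with a split two-indicator count per pair and computes each
-- rank directly as 1 + (number of strictly larger scores), removing A's sort + dict pass (objective: simpler).


-- ===== PORT A =====
-- p[k]; a `none` (Python IndexError) is excluded by Pre_get_order_numbers
def pvAIdx (p : List Int) (k : Int) : Int := (PySem.List.pyGet? p k).getD 0

-- body of A's inner `for idx_j, pair_j in enumerate(pair_list)` loop (i, pi = outer idx_i, pair_i)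
def pvAInner (i : Int) (pi : List Int) (acc2 : List Int) (jp : Int × List Int) : List Int :=
  if i == jp.1 then acc2
  else if pvAIdx pi 0 > pvAIdx jp.2 0 ∧ pvAIdx pi 1 > pvAIdx jp.2 1 then
    PySem.List.pySetD acc2 i (PySem.List.pyGetD acc2 i 0 + 2)
  else if pvAIdx pi 0 > pvAIdx jp.2 0 ∧ pvAIdx pi 1 < pvAIdx jp.2 1 then
    PySem.List.pySetD acc2 i (PySem.List.pyGetD acc2 i 0 + 1)
  else if pvAIdx pi 0 < pvAIdx jp.2 0 ∧ pvAIdx pi 1 > pvAIdx jp.2 1 then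
    PySem.List.pySetD acc2 i (PySem.List.pyGetD acc2 i 0 + 1)
  else acc2

-- body of A's rank loop over the descending-sorted scores (state = (pair_score_dict, rank))
def pvARankStep (dr : PySem.Dict Int Int × Int) (s : Int) : PySem.Dict Int Int × Int :=
  if !(dr.1.contains s) then (dr.1.insert s dr.2, dr.2 + 1) else (dr.1, dr.2 + 1)

def get_order_numbers (num : Int) (pair_list : List (List Int)) : List Int :=
  let pair_score_list : List Int := (PySem.List.pyRange 0 (pair_list.length : Int) 1).map (fun _ => 0)
  let scores := (PySem.List.enumerate pair_list).foldl
    (fun acc ip => (PySem.List.enumerate pair_list).foldl (pvAInner ip.1 ip.2) acc) pair_score_list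
  let ordered := PySem.List.sorted scores (fun x => x) true
  let dr := ordered.foldl pvARankStep (PySem.Dict.empty, 1)
  -- pair_score_dict[pair_score]: every score occurs as a key, so KeyError cannot happen
  scores.map (fun s => ((dr.1.get? s).getD 0))

-- ===== PORT B =====
-- sum((p[0] > q[0] and p[1] != q[1]) + (p[1] > q[1] and p[0] != q[0]) for q in pair_list)
-- (p[k] as pyGet?+getD: a none = IndexError is excluded by Pre_)
def pvBScore (pl : List (List Int)) (p : List Int) : Int :=
  pl.foldl (fun acc q =>
    acc + ((if (PySem.List.pyGet? p 0).getD 0 > (PySem.List.pyGet? q 0).getD 0 ∧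
               (PySem.List.pyGet? p 1).getD 0 ≠ (PySem.List.pyGet? q 1).getD 0 then 1 else 0)
         + (if (PySem.List.pyGet? p 1).getD 0 > (PySem.List.pyGet? q 1).getD 0 ∧
               (PySem.List.pyGet? p 0).getD 0 ≠ (PySem.List.pyGet? q 0).getD 0 then 1 else 0))) 0

def get_order_numbers_alt (num : Int) (pair_list : List (List Int)) : List Int :=
  let scores := pair_list.map (pvBScore pair_list)
  scores.map (fun s => 1 + scores.foldl (fun acc t => acc + (if t > s then 1 else 0)) 0)

-- ===== PRECONDITION & SPEC =====
-- Pre_ requires every pair to have at least two entries: on shorter pairs Python A raises IndexError —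
-- except when such a pair is the only element (A's loops never index it and return [1]) while B still
-- indexes it and raises, so those inputs are excluded too.
def Pre_get_order_numbers (num : Int) (pair_list : List (List Int)) : Prop :=
  ∀ p ∈ pair_list, 2 ≤ p.length
instance (num : Int) (pair_list : List (List Int)) : Decidable (Pre_get_order_numbers num pair_list) := by
  unfold Pre_get_order_numbers; infer_instance

def pvWitness_get_order_numbers : Int × List (List Int) := (2, [[55, 185], [58, 183]])

def Spec_get_order_numbers (num : Int) (pair_list : List (List Int)) (out : List Int) : Prop := out = get_order_numbers_alt num pair_list
instance (num : Int) (pair_list : List (List Int)) (out : List Int) : Decidable (Spec_get_order_numbers num pair_list out) := by unfold Spec_get_order_numbers; infer_instance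

-- ===== CLAIM (what is proved, stated in full; the proofs are below) =====
def Claim_equal_get_order_numbers : Prop := ∀ (num : Int) (pair_list : List (List Int)), Dom_get_order_numbers num pair_list → Pre_get_order_numbers num pair_list → Spec_get_order_numbers num pair_list (get_order_numbers num pair_list)

-- ===== LEMMAS AND PROOFS =====

-- A's per-comparison score increment, as a value
def pvDelta (pi q : List Int) : Int :=
  if pvAIdx pi 0 > pvAIdx q 0 ∧ pvAIdx pi 1 > pvAIdx q 1 then 2
  else if pvAIdx pi 0 > pvAIdx q 0 ∧ pvAIdx pi 1 < pvAIdx q 1 then 1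
  else if pvAIdx pi 0 < pvAIdx q 0 ∧ pvAIdx pi 1 > pvAIdx q 1 then 1
  else 0

def pvScoreA (pl : List (List Int)) (pi : List Int) : Int := (pl.map (pvDelta pi)).sum

theorem pvDelta_self (p : List Int) : pvDelta p p = 0 := by
  unfold pvDelta; split_ifs <;> first | rfl | omega

theorem pvDelta_eq_pvB (pi q : List Int) :
    pvDelta pi q = ((if (PySem.List.pyGet? pi 0).getD 0 > (PySem.List.pyGet? q 0).getD 0 ∧
               (PySem.List.pyGet? pi 1).getD 0 ≠ (PySem.List.pyGet? q 1).getD 0 then 1 else 0)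
         + (if (PySem.List.pyGet? pi 1).getD 0 > (PySem.List.pyGet? q 1).getD 0 ∧
               (PySem.List.pyGet? pi 0).getD 0 ≠ (PySem.List.pyGet? q 0).getD 0 then 1 else 0)) := by
  unfold pvDelta pvAIdx
  split_ifs <;> omega

-- one pass of A's inner loop is a single `set` at index i
theorem pvAInner_eq_set (i : Int) (pi : List Int) (acc : List Int) (jp : Int × List Int)
    (h0 : 0 ≤ i) (hlt : i.toNat < acc.length) :
    pvAInner i pi acc jp =
      acc.set i.toNat (acc.getD i.toNat 0 + (if i == jp.1 then 0 else pvDelta pi jp.2)) := by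
  have hgetD : PySem.List.pyGetD acc i 0 = acc.getD i.toNat 0 := by
    rw [PySem.List.pyGetD_eq_getElem acc 0 h0 (by omega), List.getD_eq_getElem _ _ hlt]
  have hset : ∀ v : Int, PySem.List.pySetD acc i v = acc.set i.toNat v := fun v =>
    PySem.List.pySetD_of_nonneg acc v h0
  have hid : acc.set i.toNat (acc.getD i.toNat 0 + 0) = acc := by
    rw [add_zero, List.getD_eq_getElem _ _ hlt, List.set_getElem_self]
  unfold pvAInner pvDelta
  split_ifs <;> simp_all

-- the whole inner loop adds the skip-guarded delta sum at index i
theorem pvInnerFold (pi : List Int) (i : Int) (h0 : 0 ≤ i) :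
    ∀ (l : List (Int × List Int)) (acc : List Int), i.toNat < acc.length →
    l.foldl (pvAInner i pi) acc =
      acc.set i.toNat (acc.getD i.toNat 0 +
        (l.map (fun jp => if i == jp.1 then 0 else pvDelta pi jp.2)).sum) := by
  intro l
  induction l with
  | nil =>
    intro acc hlt
    simp only [List.foldl_nil, List.map_nil, List.sum_nil, add_zero]
    rw [List.getD_eq_getElem _ _ hlt, List.set_getElem_self]
  | cons jp tl ih =>
    intro acc hlt
    have hstep := pvAInner_eq_set i pi acc jp h0 hlt
    simp only [List.foldl_cons, hstep, List.map_cons, List.sum_cons]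
    rw [ih _ (by simpa using hlt)]
    have hgd : (acc.set i.toNat (acc.getD i.toNat 0 + (if i == jp.1 then 0 else pvDelta pi jp.2))).getD i.toNat 0
        = acc.getD i.toNat 0 + (if i == jp.1 then 0 else pvDelta pi jp.2) := by
      rw [List.getD_eq_getElem _ _ (by simpa using hlt), List.getElem_set_self]
    rw [hgd, List.set_set]
    ring_nf

-- skipping the self index is free: that delta is 0
theorem pvEnumSkipSum (pi : List Int) (i : Int) :
    ∀ (xs : List (List Int)) (s : Int),
    (∀ (k : Nat) (hk : k < xs.length), s + k = i → pvDelta pi xs[k] = 0) →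
    ((PySem.List.enumerate xs s).map (fun jp => if i == jp.1 then 0 else pvDelta pi jp.2)).sum
      = (xs.map (pvDelta pi)).sum := by
  intro xs
  induction xs with
  | nil => intro s _; simp [PySem.List.enumerate_nil]
  | cons x tl ih =>
    intro s hz
    rw [PySem.List.enumerate_cons]
    simp only [List.map_cons, List.sum_cons]
    rw [ih (s+1) (fun k hk he => hz (k+1) (by simpa using hk) (by push_cast; omega))]
    by_cases he : i = s
    · have : pvDelta pi x = 0 := by
        have := hz 0 (by simp) (by omega)
        simpa using this
      simp [he, this]
    · have : (i == s) = false := by simpa using he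
      simp [this]

-- the outer loop fills positions s, s+1, … with the full delta sums
theorem pvOuterFold (pl : List (List Int)) :
    ∀ (xs : List (List Int)) (s : Nat) (acc : List Int),
    acc.length = pl.length → s + xs.length = pl.length →
    (∀ (k : Nat) (hk : k < xs.length), pl[s + k]? = some xs[k]) →
    (∀ k, s ≤ k → acc.getD k 0 = 0) →
    (PySem.List.enumerate xs (s : Int)).foldl
      (fun acc ip => (PySem.List.enumerate pl).foldl (pvAInner ip.1 ip.2) acc) acc
      = acc.take s ++ xs.map (pvScoreA pl) := by
  intro xs
  induction xs with
  | nil =>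
    intro s acc hlen hs _ _
    have hsl : s = acc.length := by simp at hs; omega
    simp [PySem.List.enumerate_nil, hsl, List.take_length]
  | cons pi tl ih =>
    intro s acc hlen hs hidx hz
    have hslt : s < acc.length := by simp at hs; omega
    rw [PySem.List.enumerate_cons, List.foldl_cons]
    have hfold := pvInnerFold pi (s : Int) (by positivity) (PySem.List.enumerate pl) acc (by simpa using hslt)
    simp only [Int.toNat_natCast] at hfold
    have hpl_s : pl[s]? = some pi := by simpa using hidx 0 (by simp)
    have hskip := pvEnumSkipSum pi (s : Int) pl 0 (by
      intro k hk he
      have hk_eq : k = s := by omega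
      subst hk_eq
      have : pl[k] = pi := by
        have := hpl_s
        rw [List.getElem?_eq_getElem hk] at this
        simpa using this
      rw [this, pvDelta_self])
    rw [hfold, hz s le_rfl, hskip]
    have hset : acc.set s (0 + (pl.map (pvDelta pi)).sum) = acc.set s (pvScoreA pl pi) := by
      rw [zero_add]; rfl
    rw [hset]
    rw [show ((s : Int) + 1) = (((s+1 : Nat)) : Int) by push_cast; ring]
    rw [ih (s+1) (acc.set s (pvScoreA pl pi)) (by simpa using hlen)
        (by simp at hs ⊢; omega)
        (by intro k hk; have := hidx (k+1) (by simpa using hk); simpa [Nat.add_assoc, Nat.add_comm 1 k] using this)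
        (by intro k hk
            have hne : (acc.set s (pvScoreA pl pi)).getD k 0 = acc.getD k 0 := by
              simp [List.getD, List.getElem?_set_ne (by omega : s ≠ k)]
            rw [hne]; exact hz k (by omega))]
    have htake : (acc.set s (pvScoreA pl pi)).take (s+1) = acc.take s ++ [pvScoreA pl pi] := by
      rw [List.set_eq_take_append_cons_drop, if_pos hslt]
      rw [List.take_append]
      simp [List.length_take, Nat.min_eq_left (Nat.le_of_lt hslt), List.take_succ_cons]
    rw [htake]
    simp

-- A's score list is pl.map (pvScoreA pl)
theorem pvScores_eq (pl : List (List Int)) :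
    (PySem.List.enumerate pl).foldl
      (fun acc ip => (PySem.List.enumerate pl).foldl (pvAInner ip.1 ip.2) acc)
      ((PySem.List.pyRange 0 (pl.length : Int) 1).map (fun _ => 0))
      = pl.map (pvScoreA pl) := by
  have h := pvOuterFold pl pl 0 ((PySem.List.pyRange 0 (pl.length : Int) 1).map (fun _ => 0))
    (by simp [PySem.List.length_pyRange_one])
    (by simp)
    (by intro k hk; simp [List.getElem?_eq_getElem hk])
    (by intro k _
        rcases Nat.lt_or_ge k ((PySem.List.pyRange 0 (pl.length:Int) 1).map (fun _ => (0:Int))).length with h | h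
        · rw [List.getD_eq_getElem _ _ h]; simp
        · rw [List.getD_eq_default _ _ h])
  simpa using h

-- B's score equals A's score
theorem pvBScore_eq (pl : List (List Int)) (p : List Int) : pvBScore pl p = pvScoreA pl p := by
  unfold pvBScore pvScoreA
  rw [PySem.List.foldl_add]
  rw [zero_add]
  exact congrArg List.sum (List.map_congr_left (fun q _ => (pvDelta_eq_pvB p q).symm))

-- the dict-building fold: lookup of an uncontained key lands at r + (first index in l)
theorem pvDictFold :
    ∀ (l : List Int) (d : PySem.Dict Int Int) (r : Int) (s : Int),
      ((d.contains s = true → (l.foldl pvARankStep (d, r)).1.get? s = d.get? s) ∧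
       (d.contains s = false → s ∈ l →
         (l.foldl pvARankStep (d, r)).1.get? s = some (r + (l.idxOf s : Int)))) := by
  intro l
  induction l with
  | nil =>
    intro d r s
    refine ⟨fun _ => rfl, fun _ h => absurd h (List.not_mem_nil)⟩
  | cons a tl ih =>
    intro d r s
    have hstep_t : d.contains a = true → pvARankStep (d, r) a = (d, r + 1) := by
      intro h; unfold pvARankStep; simp [h]
    have hstep_f : d.contains a = false → pvARankStep (d, r) a = (d.insert a r, r + 1) := by
      intro h; unfold pvARankStep; simp [h]
    constructor
    · intro hc
      rw [List.foldl_cons]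
      by_cases hca : d.contains a = true
      · rw [hstep_t hca]; exact (ih d (r+1) s).1 hc
      · have hca' : d.contains a = false := by simpa using hca
        rw [hstep_f hca']
        have hne : a ≠ s := by intro he; subst he; simp [hc] at hca'
        rw [(ih (d.insert a r) (r+1) s).1 (by rw [PySem.Dict.contains_insert]; simp [hc])]
        exact PySem.Dict.get?_insert_of_ne d r (Ne.symm hne)
    · intro hc hmem
      rw [List.foldl_cons]
      by_cases has : a = s
      · subst has
        rw [hstep_f hc]
        rw [(ih (d.insert a r) (r+1) a).1 (by rw [PySem.Dict.contains_insert]; simp)]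
        rw [PySem.Dict.get?_insert_self, List.idxOf_cons_self]
        simp
      · have hmem' : s ∈ tl := by
          rcases List.mem_cons.mp hmem with h | h
          · exact absurd h.symm has
          · exact h
        have hidx : (a :: tl).idxOf s = tl.idxOf s + 1 := by
          rw [List.idxOf_cons_ne _ (by simpa using has)]
        by_cases hca : d.contains a = true
        · rw [hstep_t hca]
          rw [(ih d (r+1) s).2 hc hmem', hidx]
          push_cast; ring_nf
        · have hca' : d.contains a = false := by simpa using hca
          rw [hstep_f hca']
          rw [(ih (d.insert a r) (r+1) s).2
              (by rw [PySem.Dict.contains_insert]; simp [hc, Ne.symm has]) hmem', hidx]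
          push_cast; ring_nf

-- in a descending-sorted list, the first index of a member counts the strictly larger elements
theorem pvIdxOf_desc :
    ∀ (l : List Int), l.Pairwise (fun a b => b ≤ a) → ∀ s ∈ l,
      (l.idxOf s : Int) = (l.countP (fun t => s < t) : Int) := by
  intro l
  induction l with
  | nil => intro _ s hs; exact absurd hs (List.not_mem_nil)
  | cons a tl ih =>
    intro hp s hs
    have hple := List.pairwise_cons.mp hp
    by_cases has : a = s
    · subst has
      rw [List.idxOf_cons_self]
      have : tl.countP (fun t => a < t) = 0 := by
        rw [List.countP_eq_zero]
        intro t ht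
        simpa using not_lt.mpr (hple.1 t ht)
      rw [List.countP_cons]
      simp [this]
    · have hmem' : s ∈ tl := by
        rcases List.mem_cons.mp hs with h | h
        · exact absurd h.symm has
        · exact h
      have hsa : s < a := lt_of_le_of_ne (hple.1 s hmem') (fun h => has h.symm)
      rw [List.idxOf_cons_ne _ (by simpa using has), List.countP_cons]
      have hih := ih hple.2 s hmem'
      simp only [hsa, decide_true, if_true, Nat.succ_eq_add_one]
      push_cast at hih ⊢
      omega

-- ===== VERDICT (by name: the statement is the Claim_ definition above) =====
theorem get_order_numbers_spec : Claim_equal_get_order_numbers := by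
  intro num pl _ _
  unfold Spec_get_order_numbers get_order_numbers get_order_numbers_alt
  simp only
  rw [pvScores_eq]
  have hb : pl.map (pvBScore pl) = pl.map (pvScoreA pl) :=
    List.map_congr_left (fun p _ => pvBScore_eq pl p)
  rw [hb]
  set scores := pl.map (pvScoreA pl) with hscores
  apply List.map_congr_left
  intro s hs
  -- A side: dict lookup
  have hmem_ord : s ∈ PySem.List.sorted scores (fun x => x) true :=
    (PySem.List.mem_sorted _ _ _ _).mpr hs
  have hdict := (pvDictFold (PySem.List.sorted scores (fun x => x) true) PySem.Dict.empty 1 s).2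
    (PySem.Dict.contains_empty s) hmem_ord
  rw [hdict]
  have hidx := pvIdxOf_desc (PySem.List.sorted scores (fun x => x) true)
    (by simpa using PySem.List.sorted_pairwise_rev scores (fun x => x)) s hmem_ord
  have hperm : (PySem.List.sorted scores (fun x => x) true).Perm scores :=
    PySem.List.sorted_perm scores (fun x => x) true
  rw [hidx, hperm.countP_eq]
  -- B side: counting fold
  rw [PySem.List.foldl_add scores (fun t => if t > s then (1:Int) else 0) 0]
  have hsum : (List.map (fun t => if t > s then (1:Int) else 0) scores).sum
      = ((List.countP (fun t => decide (s < t)) scores : Nat) : Int) := by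
    have := PySem.List.sum_map_ite_one_zero (fun t : Int => decide (s < t)) scores
    simpa using this
  rw [zero_add, hsum]
  simp
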